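-- pv_equiv track=rewrite | github.com/Benjamin-Loison/DocSolus-extractor | download.py | replaceAllDotsWithoutLast
-- ===== SOURCE A (Python) =====
-- def replaceAllDotsWithoutLast(str):
--     index = -1
--     for i in range(len(str) - 1, -1, -1):
--         if str[i] == '.':
--             index = i
--             break
--     if index != -1:
--         str = str[:index].replace('.', '_') + str[index:]
--     return str
-- ===== SOURCE B (Python) =====
-- def replaceAllDotsWithoutLast(str):
--     return str.replace('.', '_', str.count('.') - 1)
-- ===== Notes on version B (the rewrite author's own statement) =====
-- stated objective: idiomatic
-- what changed: Replaces the hand-written backward index scan for the last dot plus slicing and concatenation with a single count-limited replace: count the dots and replace all but the last one in one left-to-right pass.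
import Mathlib
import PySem

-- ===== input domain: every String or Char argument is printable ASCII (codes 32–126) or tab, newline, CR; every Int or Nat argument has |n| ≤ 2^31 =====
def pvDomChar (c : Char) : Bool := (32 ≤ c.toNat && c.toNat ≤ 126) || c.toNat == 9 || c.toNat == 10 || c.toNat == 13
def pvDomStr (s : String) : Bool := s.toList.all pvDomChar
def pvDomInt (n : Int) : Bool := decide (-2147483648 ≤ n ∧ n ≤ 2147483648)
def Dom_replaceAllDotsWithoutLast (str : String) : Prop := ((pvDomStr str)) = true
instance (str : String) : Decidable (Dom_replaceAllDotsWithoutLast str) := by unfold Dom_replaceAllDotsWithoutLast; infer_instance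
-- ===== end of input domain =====

-- B replaces A's backward scan for the last dot (plus slice/replace/concat) with a single
-- count-limited replace: count the dots, replace all but the last. Idiomatic; measured faster (constant factor).

-- ===== PORT A =====
-- the 'for i in range(len(str)-1, -1, -1): if str[i]=='.': index=i; break' loop,
-- as a recursion over the range list (early return on the break)
def pvLoopA (s : List Char) : List Int → Int
  | [] => -1
  | i :: rest => if PySem.List.pyGet? s i = some '.' then i else pvLoopA s rest

def replaceAllDotsWithoutLast (str : String) : String :=
  let s := str.toList
  let index := pvLoopA s (PySem.List.pyRange ((s.length : Int) - 1) (-1) (-1))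
  if index ≠ -1 then
    String.mk (PySem.Chars.replace (PySem.List.slice s none (some index)) ['.'] ['_']
               ++ PySem.List.slice s (some index) none)
  else
    String.mk s

-- ===== PORT B =====
-- hand port of Python's str.replace(old, new, count) for the one-char old '.':
-- exact — scans left to right, replacing at most k occurrences; k < 0 means no limit
def pvReplN : List Char → Int → List Char
  | [], _ => []
  | c :: cs, k =>
    if k = 0 then c :: cs
    else if c = '.' then '_' :: pvReplN cs (k - 1)
    else c :: pvReplN cs k

def replaceAllDotsWithoutLast_alt (str : String) : String :=
  String.mk (pvReplN str.toList ((PySem.Chars.count str.toList ['.'] : Int) - 1))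

-- ===== PRECONDITION & SPEC =====
def Spec_replaceAllDotsWithoutLast (str : String) (out : String) : Prop := out = replaceAllDotsWithoutLast_alt str
instance (str : String) (out : String) : Decidable (Spec_replaceAllDotsWithoutLast str out) := by unfold Spec_replaceAllDotsWithoutLast; infer_instance

-- ===== CLAIM (what is proved, stated in full; the proofs are below) =====
def Claim_equal_replaceAllDotsWithoutLast : Prop := ∀ (str : String), Dom_replaceAllDotsWithoutLast str → Spec_replaceAllDotsWithoutLast str (replaceAllDotsWithoutLast str)

-- ===== LEMMAS AND PROOFS =====

-- replace a char by '_' iff it is '.'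
def pvRep (c : Char) : Char := if c = '.' then '_' else c

theorem pvCount_go_singleton (d : Char) : ∀ (fuel : Nat) (l : List Char) (acc : Nat),
    l.length ≤ fuel → PySem.Chars.count.go [d] fuel l acc = acc + l.count d := by
  intro fuel
  induction fuel with
  | zero => intro l acc h; cases l with
    | nil => simp [PySem.Chars.count.go]
    | cons c cs => simp at h
  | succ n ih =>
    intro l acc h
    cases l with
    | nil => simp [PySem.Chars.count.go]
    | cons c cs =>
      simp only [List.length_cons, Nat.succ_le_succ_iff] at h
      by_cases hc : d = c
      · subst hc
        rw [PySem.Chars.count.go]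
        simp [List.isPrefixOf, ih _ _ h]
        omega
      · rw [PySem.Chars.count.go]
        simp [List.isPrefixOf, hc, ih _ _ h, Ne.symm hc]

theorem pvCount_singleton (d : Char) (l : List Char) :
    PySem.Chars.count l [d] = l.count d := by
  simp [PySem.Chars.count, pvCount_go_singleton d l.length l 0 le_rfl]

theorem pvReplace_go_singleton : ∀ (fuel : Nat) (l acc : List Char),
    l.length ≤ fuel →
    PySem.Chars.replace.go ['.'] ['_'] fuel l acc = acc.reverse ++ l.map pvRep := by
  intro fuel
  induction fuel with
  | zero => intro l acc h; cases l with
    | nil => simp [PySem.Chars.replace.go]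
    | cons c cs => simp at h
  | succ n ih =>
    intro l acc h
    cases l with
    | nil => simp [PySem.Chars.replace.go]
    | cons c cs =>
      simp only [List.length_cons, Nat.succ_le_succ_iff] at h
      by_cases hc : c = '.'
      · subst hc
        rw [PySem.Chars.replace.go]
        simp [List.isPrefixOf, ih _ _ h, pvRep]
      · rw [PySem.Chars.replace.go]
        simp [List.isPrefixOf, Ne.symm hc, ih _ _ h, pvRep, hc]

theorem pvReplace_singleton (l : List Char) :
    PySem.Chars.replace l ['.'] ['_'] = l.map pvRep := by
  simp [PySem.Chars.replace, pvReplace_go_singleton l.length l [] le_rfl]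

theorem pvMap_rep_no_dot {l : List Char} (h : '.' ∉ l) : l.map pvRep = l := by
  induction l with
  | nil => rfl
  | cons c cs ih =>
    simp only [List.mem_cons, not_or] at h
    simp [pvRep, Ne.symm h.1, ih h.2]

theorem pvReplN_no_dot {l : List Char} (k : Int) (h : '.' ∉ l) : pvReplN l k = l := by
  induction l generalizing k with
  | nil => rfl
  | cons c cs ih =>
    simp only [List.mem_cons, not_or] at h
    by_cases hk : k = 0
    · simp [pvReplN, hk]
    · simp [pvReplN, hk, Ne.symm h.1, ih _ h.2]

theorem pvReplN_main : ∀ (u t : List Char), '.' ∉ t →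
    pvReplN (u ++ '.' :: t) (u.count '.' : Int) = u.map pvRep ++ '.' :: t := by
  intro u
  induction u with
  | nil => intro t _; simp [pvReplN]
  | cons c cs ih =>
    intro t ht
    by_cases hc : c = '.'
    · subst hc
      have hk : ((('.' :: cs).count '.' : Nat) : Int) ≠ 0 := by
        simp [List.count_cons_self]; omega
      simp only [List.cons_append, pvReplN, hk, if_false]
      have : ((('.' :: cs).count '.' : Nat) : Int) - 1 = (cs.count '.' : Int) := by
        rw [List.count_cons_self]; push_cast; ring
      rw [this, ih t ht]
      simp [pvRep]
    · have hcc : (((c :: cs).count '.' : Nat) : Int) = (cs.count '.' : Int) := by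
        simp [hc]
      by_cases hz : ((cs.count '.' : Nat) : Int) = 0
      · have hcs : '.' ∉ cs := List.count_eq_zero.mp (by exact_mod_cast hz)
        simp only [List.cons_append, pvReplN, hcc, if_pos hz]
        rw [pvMap_rep_no_dot (l := c :: cs) (by simp [Ne.symm hc, hcs])]
        simp
      · simp only [List.cons_append, pvReplN, hcc, if_neg hz, if_neg hc]
        rw [ih t ht]
        simp [pvRep, hc]

-- the descending index list [n-1, ..., 0] that range(len-1, -1, -1) produces
def pvDesc (n : Nat) : List Int := (List.range n).map (fun k : Nat => (n : Int) - 1 - (k : Int))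

theorem pvRange_eq_desc (n : Nat) :
    PySem.List.pyRange ((n : Int) - 1) (-1) (-1) = pvDesc n := by
  rw [PySem.List.pyRange_neg_one]
  have h : ((n : Int) - 1 - (-1)).toNat = n := by omega
  rw [h, pvDesc]

theorem pvLoopA_skip (s : List Char) (l rest : List Int)
    (h : ∀ i ∈ l, PySem.List.pyGet? s i ≠ some '.') :
    pvLoopA s (l ++ rest) = pvLoopA s rest := by
  induction l with
  | nil => rfl
  | cons i l' ih =>
    simp only [List.mem_cons] at h
    simp [pvLoopA, h i (Or.inl rfl), ih (fun j hj => h j (Or.inr hj))]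

theorem pvDesc_split (m j : Nat) :
    pvDesc (m + 1 + j) = (List.range j).map (fun k : Nat => ((m + 1 + j : Nat) : Int) - 1 - (k : Int))
      ++ pvDesc (m + 1) := by
  unfold pvDesc
  rw [show m + 1 + j = j + (m + 1) by omega, List.range_add, List.map_append]
  rw [List.map_map]
  congr 1 <;> apply List.map_congr_left <;> intro k _ <;>
    (try simp only [Function.comp_apply]) <;> (push_cast; ring)

theorem pvLoopA_last_dot (u t : List Char) (ht : '.' ∉ t) :
    pvLoopA (u ++ '.' :: t) (pvDesc (u ++ '.' :: t).length) = (u.length : Int) := by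
  set s := u ++ '.' :: t with hs
  have hlen : s.length = u.length + 1 + t.length := by simp [hs]; omega
  rw [hlen, pvDesc_split]
  rw [pvLoopA_skip]
  · rw [pvDesc, List.range_succ_eq_map, List.map_cons]
    have hhead : ((u.length + 1 : Nat) : Int) - 1 - ((0 : Nat) : Int) = (u.length : Int) := by
      push_cast; ring
    rw [hhead]
    have hget : PySem.List.pyGet? s (u.length : Int) = some '.' := by
      rw [PySem.List.pyGet?_natCast, hs, List.getElem?_append_right le_rfl]
      simp
    simp [pvLoopA, hget]
  · intro i hi
    simp only [List.mem_map, List.mem_range] at hi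
    obtain ⟨k, hk, rfl⟩ := hi
    have h2 : ((u.length + 1 + t.length : Nat) : Int) - 1 - (k : Int)
        = ↑(u.length + 1 + (t.length - 1 - k)) := by push_cast; omega
    rw [h2, PySem.List.pyGet?_natCast]
    intro hget
    rw [hs, show u.length + 1 + (t.length - 1 - k) = u.length + (1 + (t.length - 1 - k)) by omega,
        List.getElem?_append_right (Nat.le_add_right _ _)] at hget
    simp only [Nat.add_sub_cancel_left] at hget
    rw [show 1 + (t.length - 1 - k) = (t.length - 1 - k) + 1 by omega,
        List.getElem?_cons_succ] at hget
    exact ht (List.mem_of_getElem? hget)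

theorem pvLoopA_no_dot (s : List Char) (h : '.' ∉ s) :
    pvLoopA s (pvDesc s.length) = -1 := by
  have hh := pvLoopA_skip s (pvDesc s.length) [] ?_
  · simpa using hh
  · intro i hi
    simp only [pvDesc, List.mem_map, List.mem_range] at hi
    obtain ⟨k, hk, rfl⟩ := hi
    have h2 : (s.length : Int) - 1 - (k : Int) = ↑(s.length - 1 - k) := by
      omega
    rw [h2, PySem.List.pyGet?_natCast]
    intro hget
    exact h (List.mem_of_getElem? hget)

-- last-dot decomposition
theorem pvDecomp {s : List Char} (h : '.' ∈ s) :
    ∃ u t, s = u ++ '.' :: t ∧ '.' ∉ t := by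
  induction s using List.reverseRecOn with
  | nil => simp at h
  | append_singleton xs x ih =>
    by_cases hx : x = '.'
    · exact ⟨xs, [], by simp [hx], by simp⟩
    · have hxs : '.' ∈ xs := by
        rcases List.mem_append.mp h with h1 | h1
        · exact h1
        · simp at h1; exact absurd h1.symm hx
      obtain ⟨u, t, rfl, ht⟩ := ih hxs
      exact ⟨u, t ++ [x], by simp, by simp [ht, Ne.symm hx]⟩

-- ===== VERDICT (by name: the statement is the Claim_ definition above) =====
theorem replaceAllDotsWithoutLast_spec : Claim_equal_replaceAllDotsWithoutLast := by
  intro str _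
  unfold Spec_replaceAllDotsWithoutLast
  simp only [replaceAllDotsWithoutLast, replaceAllDotsWithoutLast_alt]
  rw [← apply_ite String.mk]
  refine congrArg String.mk ?_
  set s := str.toList with hs
  rw [pvRange_eq_desc, pvCount_singleton]
  by_cases h : '.' ∈ s
  · obtain ⟨u, t, hdec, ht⟩ := pvDecomp h
    rw [hdec, pvLoopA_last_dot u t ht]
    have hcount : ((u ++ '.' :: t).count '.' : Int) - 1 = (u.count '.' : Int) := by
      simp [List.count_append, List.count_cons_self, List.count_eq_zero.mpr ht]
    rw [hcount, pvReplN_main u t ht]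
    have hne : ¬((u.length : Int) = -1) := by omega
    rw [if_pos hne, PySem.List.slice_to _ (by positivity),
        PySem.List.slice_from _ (by positivity), pvReplace_singleton]
    simp
  · have hc : s.count '.' = 0 := List.count_eq_zero.mpr h
    rw [pvLoopA_no_dot s h]
    rw [if_neg (by simp)]
    rw [pvReplN_no_dot _ h]
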